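-- pv_equiv track=rewrite | github.com/pytorch-labs/tritonparse | tritonparse/reproducer/orchestrator.py | _generate_invocation_snippet
-- ===== SOURCE A (Python) =====
-- def _generate_invocation_snippet(
--     positional_args: list[str], keyword_args: list[str]
-- ) -> str:
--     """Generates a single-line Python code snippet for kernel invocation."""
--     # Prepare positional args for direct injection into the call
--     pos_args_str = ", ".join([f'args_dict["{arg}"]' for arg in positional_args])
--
--     # Prepare keyword args for direct injection
--     kw_args_str = ", ".join([f'{arg}=args_dict["{arg}"]' for arg in keyword_args])
--
--     # Combine them, ensuring proper comma separation
--     all_args = []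
--     if pos_args_str:
--         all_args.append(pos_args_str)
--     if kw_args_str:
--         all_args.append(kw_args_str)
--
--     # Create the single-line call
--     return f"imported_kernel_function[tuple(grid)]({', '.join(all_args)})"
-- ===== SOURCE B (Python) =====
-- def _generate_invocation_snippet(
--     positional_args: list[str], keyword_args: list[str]
-- ) -> str:
--     """Generates a single-line Python code snippet for kernel invocation."""
--     out = "imported_kernel_function[tuple(grid)]("
--     sep = ""
--     for arg in positional_args:
--         out += sep + 'args_dict["' + arg + '"]'
--         sep = ", "
--     for arg in keyword_args:
--         out += sep + arg + '=args_dict["' + arg + '"]'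
--         sep = ", "
--     return out + ")"
-- ===== Notes on version B (the rewrite author's own statement) =====
-- stated objective: alternative
-- what changed: B builds the call string in a single pass with a string accumulator and a separator flag (sep starts empty, becomes ', ' after the first emitted argument), instead of A's build-fragment-lists, join twice, filter-empties-and-join-again pipeline.
import Mathlib
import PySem

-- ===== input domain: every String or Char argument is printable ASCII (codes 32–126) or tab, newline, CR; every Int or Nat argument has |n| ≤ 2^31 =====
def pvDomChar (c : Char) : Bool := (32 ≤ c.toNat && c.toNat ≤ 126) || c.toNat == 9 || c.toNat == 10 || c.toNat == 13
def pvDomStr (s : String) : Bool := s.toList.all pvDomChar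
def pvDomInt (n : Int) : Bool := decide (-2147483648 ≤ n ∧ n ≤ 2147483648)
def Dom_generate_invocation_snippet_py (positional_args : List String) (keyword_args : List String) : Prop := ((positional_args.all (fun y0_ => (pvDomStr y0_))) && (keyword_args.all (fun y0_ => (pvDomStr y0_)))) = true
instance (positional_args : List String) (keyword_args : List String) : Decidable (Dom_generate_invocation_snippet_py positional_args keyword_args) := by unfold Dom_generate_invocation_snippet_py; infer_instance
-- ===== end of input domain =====

-- B builds the call string in one pass with a string accumulator and a separator flag,
-- instead of A's join-fragments / filter-empties / join-again pipeline (objective: alternative).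

-- ===== PORT A =====
-- f'args_dict["{arg}"]' (on code points; exact for the snippet template)
def pvPosFrag (arg : String) : List Char := "args_dict[\"".toList ++ arg.toList ++ "\"]".toList
-- f'{arg}=args_dict["{arg}"]'
def pvKwFrag (arg : String) : List Char := arg.toList ++ "=args_dict[\"".toList ++ arg.toList ++ "\"]".toList

def generate_invocation_snippet_py (positional_args : List String) (keyword_args : List String) : String :=
  let pos_args_str := PySem.Chars.join ", ".toList (positional_args.map pvPosFrag)
  let kw_args_str := PySem.Chars.join ", ".toList (keyword_args.map pvKwFrag)
  -- all_args = []; if pos_args_str: append; if kw_args_str: append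
  let all_args := (if pos_args_str ≠ [] then [pos_args_str] else []) ++
                  (if kw_args_str ≠ [] then [kw_args_str] else [])
  String.mk ("imported_kernel_function[tuple(grid)](".toList ++
    PySem.Chars.join ", ".toList all_args ++ ")".toList)

-- ===== PORT B =====
-- state = (out, sep); 'out += sep + <fragment>; sep = ", "' for each arg of each loop
-- out += sep + 'args_dict["' + arg + '"]'; sep = ", "
def pvStepPos (st : List Char × List Char) (a : String) : List Char × List Char :=
  (st.1 ++ st.2 ++ "args_dict[\"".toList ++ a.toList ++ "\"]".toList, [',', ' '])
-- out += sep + arg + '=args_dict["' + arg + '"]'; sep = ", "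
def pvStepKw (st : List Char × List Char) (a : String) : List Char × List Char :=
  (st.1 ++ st.2 ++ a.toList ++ "=args_dict[\"".toList ++ a.toList ++ "\"]".toList, [',', ' '])

def generate_invocation_snippet_py_alt (positional_args : List String) (keyword_args : List String) : String :=
  let st0 : List Char × List Char := ("imported_kernel_function[tuple(grid)](".toList, [])
  let st1 := positional_args.foldl pvStepPos st0
  let st2 := keyword_args.foldl pvStepKw st1
  String.mk (st2.1 ++ ")".toList)

-- ===== PRECONDITION & SPEC =====
def Spec_generate_invocation_snippet_py (positional_args : List String) (keyword_args : List String) (out : String) : Prop := out = generate_invocation_snippet_py_alt positional_args keyword_args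
instance (positional_args : List String) (keyword_args : List String) (out : String) : Decidable (Spec_generate_invocation_snippet_py positional_args keyword_args out) := by unfold Spec_generate_invocation_snippet_py; infer_instance

-- ===== CLAIM =====
def Claim_equal_generate_invocation_snippet_py : Prop := ∀ (positional_args : List String) (keyword_args : List String), Dom_generate_invocation_snippet_py positional_args keyword_args → Spec_generate_invocation_snippet_py positional_args keyword_args (generate_invocation_snippet_py positional_args keyword_args)

-- ===== LEMMAS AND PROOFS =====

-- the accumulator loop equals "acc, then (if nonempty) sep and the join of the fragments"
theorem pv_loop_spec (frag : String → List Char) (xs : List String) (acc sep : List Char) :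
    xs.foldl (fun st a => (st.1 ++ st.2 ++ frag a, [',', ' '])) (acc, sep) =
      (acc ++ (if xs = [] then [] else sep ++ PySem.Chars.join [',', ' '] (xs.map frag)),
       if xs = [] then sep else [',', ' ']) := by
  induction xs generalizing acc sep with
  | nil => simp
  | cons x rest ih =>
    simp only [List.foldl_cons, ih]
    cases rest with
    | nil => simp [PySem.Chars.join_singleton]
    | cons y ys =>
      simp [PySem.Chars.join_cons_cons, List.append_assoc]

theorem pv_join_cons_ne_nil (sep a : List Char) (l : List (List Char)) (ha : a ≠ []) :
    PySem.Chars.join sep (a :: l) ≠ [] := by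
  cases l with
  | nil => simpa [PySem.Chars.join_singleton] using ha
  | cons b l =>
    rw [PySem.Chars.join_cons_cons]
    simp [ha]

theorem pv_posFrag_ne_nil (a : String) : pvPosFrag a ≠ [] := by simp [pvPosFrag]
theorem pv_kwFrag_ne_nil (a : String) : pvKwFrag a ≠ [] := by simp [pvKwFrag]

theorem pv_stepPos_eq : pvStepPos = fun st a => (st.1 ++ st.2 ++ pvPosFrag a, [',', ' ']) := by
  funext st a; simp [pvStepPos, pvPosFrag, List.append_assoc]

theorem pv_stepKw_eq : pvStepKw = fun st a => (st.1 ++ st.2 ++ pvKwFrag a, [',', ' ']) := by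
  funext st a; simp [pvStepKw, pvKwFrag, List.append_assoc]

-- ===== VERDICT =====
theorem generate_invocation_snippet_py_spec : Claim_equal_generate_invocation_snippet_py := by
  intro pos kw _
  unfold Spec_generate_invocation_snippet_py generate_invocation_snippet_py generate_invocation_snippet_py_alt
  rw [pv_stepPos_eq, pv_stepKw_eq]
  dsimp only
  rw [pv_loop_spec, pv_loop_spec]
  cases pos with
  | nil =>
    cases kw with
    | nil => simp [PySem.Chars.join_nil]
    | cons k ks =>
      have hk : PySem.Chars.join [',', ' '] (pvKwFrag k :: ks.map pvKwFrag) ≠ [] :=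
        pv_join_cons_ne_nil _ _ _ (pv_kwFrag_ne_nil k)
      simp [PySem.Chars.join_nil, hk]
  | cons p ps =>
    cases kw with
    | nil =>
      have hp : PySem.Chars.join [',', ' '] (pvPosFrag p :: ps.map pvPosFrag) ≠ [] :=
        pv_join_cons_ne_nil _ _ _ (pv_posFrag_ne_nil p)
      simp [PySem.Chars.join_nil, hp]
    | cons k ks =>
      have hp : PySem.Chars.join [',', ' '] (pvPosFrag p :: ps.map pvPosFrag) ≠ [] :=
        pv_join_cons_ne_nil _ _ _ (pv_posFrag_ne_nil p)
      have hk : PySem.Chars.join [',', ' '] (pvKwFrag k :: ks.map pvKwFrag) ≠ [] :=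
        pv_join_cons_ne_nil _ _ _ (pv_kwFrag_ne_nil k)
      simp [hp, hk, PySem.Chars.join_cons_cons, PySem.Chars.join_singleton,
        List.append_assoc]
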